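-- pv_equiv track=rewrite | github.com/erwanM974/hibou_nfagen_concrete_usecases | genRovers.py | gen_interaction_inner
-- ===== SOURCE A (Python) =====
-- def interaction_normal_pattern(tab_shift, origin, target):
--     return """{0}loopS(
-- {0}\tseq(
-- {0}\t\tloopS({1} -- SU -> {2}),
-- {0}\t\tLaneS -> {1},
-- {0}\t\tloopS({1} -- EB -> {2}),
-- {0}\t\tLaneF -> {1}
-- {0}\t)
-- {0})""".format("\t"*tab_shift, origin, target)
--
-- def gen_interaction_inner(tab_shift, rover_shift, total_rover_num):
--     if total_rover_num - rover_shift == 2: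
--         origin = "Rover" + str(rover_shift)
--         target = "Rover" + str(rover_shift+1)
--         return interaction_normal_pattern(tab_shift, origin, target)
--     else:
--         origin = "Rover" + str(rover_shift)
--         targets = "(" + ",".join(["Rover" + str(x) for x in range(rover_shift+1,total_rover_num)]) + ")"
--         part1 = interaction_normal_pattern(tab_shift+1, origin, targets)
--         part2 = "{0} -- LP -> {1}".format(origin,targets)
--         part3 = gen_interaction_inner(tab_shift+3,rover_shift+1,total_rover_num)
--         return """{0}seq(
-- {1},
-- {0}\talt(
-- {0}\t\tseq(
-- {0}\t\t\t{2},
-- {3}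
-- {0}\t\t),
-- {0}\t\to
-- {0}\t)
-- {0})""".format("\t"*tab_shift, part1, part2, part3)
-- ===== SOURCE B (Python) =====
-- def interaction_normal_pattern(tab_shift, origin, target):
--     return """{0}loopS(
-- {0}\tseq(
-- {0}\t\tloopS({1} -- SU -> {2}),
-- {0}\t\tLaneS -> {1},
-- {0}\t\tloopS({1} -- EB -> {2}),
-- {0}\t\tLaneF -> {1}
-- {0}\t)
-- {0})""".format("\t"*tab_shift, origin, target)
--
-- def gen_interaction_inner(tab_shift, rover_shift, total_rover_num):
--     # iterative bottom-up: build the innermost pattern first, then wrap k times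
--     k = total_rover_num - rover_shift - 2
--     if k < 0:
--         raise ValueError("need at least two rovers (total_rover_num - rover_shift >= 2)")
--     acc = interaction_normal_pattern(tab_shift + 3*k,
--                                      "Rover" + str(rover_shift + k),
--                                      "Rover" + str(rover_shift + k + 1))
--     for i in range(k - 1, -1, -1):
--         tabs = "\t" * (tab_shift + 3*i)
--         origin = "Rover" + str(rover_shift + i)
--         targets = "(" + ",".join(["Rover" + str(x) for x in range(rover_shift + i + 1, total_rover_num)]) + ")"
--         part1 = interaction_normal_pattern(tab_shift + 3*i + 1, origin, targets)
--         acc = """{0}seq(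
-- {1},
-- {0}\talt(
-- {0}\t\tseq(
-- {0}\t\t\t{2} -- LP -> {3},
-- {4}
-- {0}\t\t),
-- {0}\t\to
-- {0}\t)
-- {0})""".format(tabs, part1, origin, targets, acc)
--     return acc
-- ===== Notes on version B (the rewrite author's own statement) =====
-- stated objective: alternative
-- what changed: Replaced A's top-down recursion by an iterative bottom-up loop: compute the nesting depth k, build the innermost loopS pattern first, then wrap it k times with the seq/alt template from inner to outer.
import Mathlib
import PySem

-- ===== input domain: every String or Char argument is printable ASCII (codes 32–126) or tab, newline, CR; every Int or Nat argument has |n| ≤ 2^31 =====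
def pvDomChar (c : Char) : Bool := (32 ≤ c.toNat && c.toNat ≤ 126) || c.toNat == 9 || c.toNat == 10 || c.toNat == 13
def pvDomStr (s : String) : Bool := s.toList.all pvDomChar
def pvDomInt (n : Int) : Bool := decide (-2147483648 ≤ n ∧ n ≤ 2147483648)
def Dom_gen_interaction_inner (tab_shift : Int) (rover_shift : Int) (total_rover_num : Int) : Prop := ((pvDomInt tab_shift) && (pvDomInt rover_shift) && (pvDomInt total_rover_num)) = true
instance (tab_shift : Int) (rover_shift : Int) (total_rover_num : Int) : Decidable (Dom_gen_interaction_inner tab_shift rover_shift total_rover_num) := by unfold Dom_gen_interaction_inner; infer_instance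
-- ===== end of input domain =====

-- B replaces A's top-down recursion by an iterative bottom-up loop (build the innermost
-- pattern, then wrap k times); same output wherever A returns (objective: alternative decomposition).


-- ===== PORT A =====
-- "\t"*n — exact: Python string repetition yields "" for n ≤ 0, as does Int.toNat here
def pvTabs (n : Int) : String := String.ofList (List.replicate n.toNat '\t')
-- "Rover" + str(n)
def pvRover (n : Int) : String := "Rover" ++ PySem.Int.toStr n
-- "(" + ",".join(["Rover"+str(x) for x in range(a,b)]) + ")"
def pvTargets (a b : Int) : String :=
  "(" ++ PySem.Str.join "," ((PySem.List.pyRange a b 1).map pvRover) ++ ")"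
-- module helper interaction_normal_pattern: the format string, hole for hole
def interaction_normal_pattern (tab_shift : Int) (origin target : String) : String :=
  let t := pvTabs tab_shift
  t ++ "loopS(\n" ++ t ++ "\tseq(\n" ++
  t ++ "\t\tloopS(" ++ origin ++ " -- SU -> " ++ target ++ "),\n" ++
  t ++ "\t\tLaneS -> " ++ origin ++ ",\n" ++
  t ++ "\t\tloopS(" ++ origin ++ " -- EB -> " ++ target ++ "),\n" ++
  t ++ "\t\tLaneF -> " ++ origin ++ "\n" ++
  t ++ "\t)\n" ++ t ++ ")"
-- the seq/alt format string of A's else-branch (identical in Source B), hole for hole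
def pvSeqAlt (tabs part1 part2 part3 : String) : String :=
  tabs ++ "seq(\n" ++ part1 ++ ",\n" ++ tabs ++ "\talt(\n" ++ tabs ++ "\t\tseq(\n" ++
  tabs ++ "\t\t\t" ++ part2 ++ ",\n" ++ part3 ++ "\n" ++
  tabs ++ "\t\t),\n" ++ tabs ++ "\t\to\n" ++ tabs ++ "\t)\n" ++ tabs ++ ")"

-- A's recursion, fuel = total_rover_num - rover_shift (decreases by 1 per call; the fuel-0
-- branch is unreachable whenever Pre_ holds — in Python those inputs hit RecursionError)
def pvAgo : Nat → Int → Int → Int → String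
  | 0, _, _, _ => ""
  | n+1, tab_shift, rover_shift, total_rover_num =>
    if total_rover_num - rover_shift == 2 then
      interaction_normal_pattern tab_shift (pvRover rover_shift) (pvRover (rover_shift+1))
    else
      let origin := pvRover rover_shift
      let targets := pvTargets (rover_shift+1) total_rover_num
      let part1 := interaction_normal_pattern (tab_shift+1) origin targets
      let part2 := origin ++ " -- LP -> " ++ targets
      let part3 := pvAgo n (tab_shift+3) (rover_shift+1) total_rover_num
      pvSeqAlt (pvTabs tab_shift) part1 part2 part3

def gen_interaction_inner (tab_shift : Int) (rover_shift : Int) (total_rover_num : Int) : String :=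
  pvAgo (total_rover_num - rover_shift).toNat tab_shift rover_shift total_rover_num

-- ===== PORT B =====
-- the loop body of Source B (one wrap at level i)
def pvWrap (tab_shift rover_shift total_rover_num : Int) (acc : String) (i : Int) : String :=
  let origin := pvRover (rover_shift + i)
  let targets := pvTargets (rover_shift + i + 1) total_rover_num
  pvSeqAlt (pvTabs (tab_shift + 3*i))
    (interaction_normal_pattern (tab_shift + 3*i + 1) origin targets)
    (origin ++ " -- LP -> " ++ targets) acc

def gen_interaction_inner_alt (tab_shift : Int) (rover_shift : Int) (total_rover_num : Int) : String :=
  let k := total_rover_num - rover_shift - 2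
  if k < 0 then ""  -- Source B raises ValueError here; excluded by Pre_, so "" stands for the raise
  else
    let base := interaction_normal_pattern (tab_shift + 3*k)
                  (pvRover (rover_shift + k)) (pvRover (rover_shift + k + 1))
    (PySem.List.pyRange (k-1) (-1) (-1)).foldl (pvWrap tab_shift rover_shift total_rover_num) base

-- ===== PRECONDITION & SPEC =====
-- Pre_ excludes exactly the inputs with total_rover_num - rover_shift < 2, on which the
-- Python A recurses without a base case and raises RecursionError (and Source B raises ValueError).
def Pre_gen_interaction_inner (tab_shift : Int) (rover_shift : Int) (total_rover_num : Int) : Prop :=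
  2 ≤ total_rover_num - rover_shift
instance (tab_shift : Int) (rover_shift : Int) (total_rover_num : Int) : Decidable (Pre_gen_interaction_inner tab_shift rover_shift total_rover_num) := by unfold Pre_gen_interaction_inner; infer_instance
def pvWitness_gen_interaction_inner : Int × Int × Int := (0, 0, 3)

def Spec_gen_interaction_inner (tab_shift : Int) (rover_shift : Int) (total_rover_num : Int) (out : String) : Prop := out = gen_interaction_inner_alt tab_shift rover_shift total_rover_num
instance (tab_shift : Int) (rover_shift : Int) (total_rover_num : Int) (out : String) : Decidable (Spec_gen_interaction_inner tab_shift rover_shift total_rover_num out) := by unfold Spec_gen_interaction_inner; infer_instance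

-- ===== CLAIM (what is proved, stated in full; the proofs are below) =====
def Claim_equal_gen_interaction_inner : Prop := ∀ (tab_shift : Int) (rover_shift : Int) (total_rover_num : Int), Dom_gen_interaction_inner tab_shift rover_shift total_rover_num → Pre_gen_interaction_inner tab_shift rover_shift total_rover_num → Spec_gen_interaction_inner tab_shift rover_shift total_rover_num (gen_interaction_inner tab_shift rover_shift total_rover_num)

-- ===== LEMMAS AND PROOFS =====
-- the descending list [k-1, …, 0]
def pvDown : Nat → List Int
  | 0 => []
  | n+1 => (n : Int) :: pvDown n

theorem pvDown_eq_pyRange (k : Nat) :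
    PySem.List.pyRange ((k : Int) - 1) (-1) (-1) = pvDown k := by
  induction k with
  | zero => exact PySem.List.pyRange_neg_one_eq_nil (by norm_num)
  | succ n ih =>
    rw [PySem.List.pyRange_neg_one_cons (by push_cast; omega)]
    simp only [pvDown]
    push_cast
    have e1 : (n:Int) + 1 - 1 = (n:Int) := by ring
    rw [e1, ih]

theorem pvDown_succ (k : Nat) :
    pvDown (k+1) = (pvDown k).map (· + 1) ++ [(0 : Int)] := by
  induction k with
  | zero => simp [pvDown]
  | succ n ih =>
    calc pvDown (n+2) = ((n+1 : Nat) : Int) :: pvDown (n+1) := rfl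
    _ = ((n+1 : Nat) : Int) :: ((pvDown n).map (· + 1) ++ [(0:Int)]) := by rw [ih]
    _ = ((pvDown (n+1)).map (· + 1)) ++ [(0:Int)] := by
        simp only [pvDown, List.map_cons, List.cons_append]
        push_cast
        simp

theorem pvWrap_shift (t r total : Int) (acc : String) (i : Int) :
    pvWrap t r total acc (i+1) = pvWrap (t+3) (r+1) total acc i := by
  unfold pvWrap; ring_nf

set_option maxRecDepth 8000 in
theorem pv_main (k : Nat) : ∀ (t r total : Int), total - r - 2 = (k : Int) →
    pvAgo (k+2) t r total = gen_interaction_inner_alt t r total := by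
  induction k with
  | zero =>
    intro t r total h
    have h2 : (total - r == 2) = true := by simp; omega
    simp only [pvAgo, h2, if_true]
    simp only [gen_interaction_inner_alt, h]
    rw [if_neg (by norm_num)]
    rw [pvDown_eq_pyRange 0]
    simp only [pvDown, List.foldl_nil]
    norm_num
  | succ n ih =>
    intro t r total h
    have hne : (total - r == 2) = false := by simp; omega
    have hrec : total - (r+1) - 2 = (n : Int) := by omega
    have step : pvAgo (n+1+2) t r total
        = if (total - r == 2) = true then
            interaction_normal_pattern t (pvRover r) (pvRover (r+1))
          else
            pvSeqAlt (pvTabs t)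
              (interaction_normal_pattern (t+1) (pvRover r) (pvTargets (r+1) total))
              (pvRover r ++ " -- LP -> " ++ pvTargets (r+1) total)
              (pvAgo (n+2) (t+3) (r+1) total) := rfl
    rw [step, hne]
    simp only [Bool.false_eq_true, if_false]
    rw [ih (t+3) (r+1) total hrec]
    simp only [gen_interaction_inner_alt, h, hrec]
    rw [if_neg (by push_cast; omega), if_neg (by push_cast; omega)]
    rw [pvDown_eq_pyRange (n+1), pvDown_succ, List.foldl_append, List.foldl_map,
        pvDown_eq_pyRange n, List.foldl_cons, List.foldl_nil]
    have hfun : (fun (acc : String) (i : Int) => pvWrap t r total acc (i + 1))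
        = pvWrap (t+3) (r+1) total := by
      funext acc i; exact pvWrap_shift t r total acc i
    rw [hfun]
    unfold pvWrap
    push_cast
    ring_nf

-- ===== VERDICT (by name: the statement is the Claim_ definition above) =====
theorem gen_interaction_inner_spec : Claim_equal_gen_interaction_inner := by
  intro t r total _ hpre
  unfold Spec_gen_interaction_inner gen_interaction_inner
  have hk : ∃ k : Nat, total - r - 2 = (k : Int) := ⟨(total - r - 2).toNat, by
    have : (0:Int) ≤ total - r - 2 := by unfold Pre_gen_interaction_inner at hpre; omega
    omega⟩
  obtain ⟨k, hkeq⟩ := hk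
  have : (total - r).toNat = k + 2 := by omega
  rw [this]
  exact pv_main k t r total hkeq
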